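-- pv_equiv track=rewrite | github.com/bait9test/logslice | logslice/differ.py | diff_logs
-- ===== SOURCE A (Python) =====
-- from typing import Iterable, Iterator, Literal
--
-- Mode = Literal["left", "right", "common", "all"]
--
-- def _key(line: str) -> str:
--     """Strip leading/trailing whitespace for comparison purposes."""
--     return line.rstrip("\n")
--
-- def diff_logs(
--     left: Iterable[str],
--     right: Iterable[str],
--     mode: Mode = "all",
-- ) -> Iterator[tuple[str, str]]:
--     """Compare two log streams line by line (set-based).
--
--     Yields ``(tag, line)`` tuples where *tag* is one of:
--       - ``"<"``  line only in *left*
--       - ``">"``  line only in *right*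
--       - ``"="``  line present in both
--
--     Parameters
--     ----------
--     left, right:
--         Iterables of log lines.
--     mode:
--         ``"left"``   – only lines unique to left
--         ``"right"``  – only lines unique to right
--         ``"common"`` – only shared lines
--         ``"all"``    – everything (default)
--     """
--     left_set = {_key(l) for l in left}
--     right_set = {_key(r) for r in right}
--
--     common = left_set & right_set
--     only_left = left_set - right_set
--     only_right = right_set - left_set
--
--     results: list[tuple[str, str]] = []
--
--     if mode in ("left", "all"):
--         results.extend(("<", ln + "\n") for ln in sorted(only_left))
--     if mode in ("right", "all"):
--         results.extend((">" , ln + "\n") for ln in sorted(only_right))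
--     if mode in ("common", "all"):
--         results.extend(("=", ln + "\n") for ln in sorted(common))
--
--     yield from results
-- ===== SOURCE B (Python) =====
-- def _key(line: str) -> str:
--     return line.rstrip("\n")
--
-- def diff_logs(left, right, mode="all"):
--     lk = sorted(set(map(_key, left)))
--     rk = sorted(set(map(_key, right)))
--     only_left, only_right, common = [], [], []
--     i = j = 0
--     while i < len(lk) and j < len(rk):
--         if lk[i] == rk[j]:
--             common.append(lk[i]); i += 1; j += 1
--         elif lk[i] < rk[j]:
--             only_left.append(lk[i]); i += 1
--         else:
--             only_right.append(rk[j]); j += 1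
--     only_left.extend(lk[i:])
--     only_right.extend(rk[j:])
--     out = []
--     if mode in ("left", "all"):
--         out += [("<", ln + "\n") for ln in only_left]
--     if mode in ("right", "all"):
--         out += [(">", ln + "\n") for ln in only_right]
--     if mode in ("common", "all"):
--         out += [("=", ln + "\n") for ln in common]
--     yield from out
-- ===== Notes on version B (the rewrite author's own statement) =====
-- stated objective: alternative
-- what changed: Instead of three hash-set operations (intersection and two differences) each followed by its own sort, B sorts and dedups the two key lists once and computes only_left/only_right/common in a single two-pointer merge pass.
import Mathlib
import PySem

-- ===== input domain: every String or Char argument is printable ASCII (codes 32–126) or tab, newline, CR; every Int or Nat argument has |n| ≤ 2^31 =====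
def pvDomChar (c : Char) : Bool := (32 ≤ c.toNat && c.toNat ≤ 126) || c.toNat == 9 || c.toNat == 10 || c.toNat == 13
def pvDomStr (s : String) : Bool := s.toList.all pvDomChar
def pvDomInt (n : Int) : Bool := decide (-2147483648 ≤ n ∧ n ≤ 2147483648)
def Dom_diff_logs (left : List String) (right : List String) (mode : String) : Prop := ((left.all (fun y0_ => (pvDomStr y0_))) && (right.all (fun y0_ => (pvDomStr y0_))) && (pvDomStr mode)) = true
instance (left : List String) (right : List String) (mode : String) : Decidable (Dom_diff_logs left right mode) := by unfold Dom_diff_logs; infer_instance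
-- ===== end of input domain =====

-- B replaces A's three set operations (intersection and two differences) each followed by its own
-- sort with a single two-pointer merge over the two sorted deduped key lists (alternative algorithm, similar cost).
-- A is a generator in Python; the equivalence is about the list of yielded tuples.


-- ===== PORT A =====
-- _key(line) = line.rstrip("\n"): hand port, exact — drops exactly the trailing '\n' characters
def pvKey (line : String) : String :=
  String.ofList ((line.toList.reverse.dropWhile (fun c => c == '\n')).reverse)

def diff_logs (left : List String) (right : List String) (mode : String) : List (String × String) :=
  let left_set : PySem.Set String := PySem.Set.ofList (left.map pvKey)
  let right_set : PySem.Set String := PySem.Set.ofList (right.map pvKey)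
  let common := PySem.Set.inter left_set right_set
  let only_left := PySem.Set.diff left_set right_set
  let only_right := PySem.Set.diff right_set left_set
  let results : List (String × String) := []
  let results := if mode = "left" ∨ mode = "all" then
      results ++ (PySem.List.sorted only_left (fun x => x)).map (fun ln => ("<", ln ++ "\n")) else results
  let results := if mode = "right" ∨ mode = "all" then
      results ++ (PySem.List.sorted only_right (fun x => x)).map (fun ln => (">", ln ++ "\n")) else results
  let results := if mode = "common" ∨ mode = "all" then
      results ++ (PySem.List.sorted common (fun x => x)).map (fun ln => ("=", ln ++ "\n")) else results
  results

-- ===== PORT B =====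
-- the while-loop two-pointer merge of Source B, including draining the leftover tails
def pvMerge : List String → List String → List String × List String × List String
  | ls, [] => (ls, [], [])
  | [], r :: rs => ([], r :: rs, [])
  | l :: ls, r :: rs =>
    if l = r then
      let (ol, og, co) := pvMerge ls rs
      (ol, og, l :: co)
    else if l < r then
      let (ol, og, co) := pvMerge ls (r :: rs)
      (l :: ol, og, co)
    else
      let (ol, og, co) := pvMerge (l :: ls) rs
      (ol, r :: og, co)

def diff_logs_alt (left : List String) (right : List String) (mode : String) : List (String × String) :=
  let lk := PySem.List.sorted (PySem.Set.ofList (left.map pvKey)) (fun x => x)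
  let rk := PySem.List.sorted (PySem.Set.ofList (right.map pvKey)) (fun x => x)
  let (only_left, only_right, common) := pvMerge lk rk
  let out : List (String × String) := []
  let out := if mode = "left" ∨ mode = "all" then
      out ++ only_left.map (fun ln => ("<", ln ++ "\n")) else out
  let out := if mode = "right" ∨ mode = "all" then
      out ++ only_right.map (fun ln => (">", ln ++ "\n")) else out
  let out := if mode = "common" ∨ mode = "all" then
      out ++ common.map (fun ln => ("=", ln ++ "\n")) else out
  out

-- ===== PRECONDITION & SPEC =====
def Spec_diff_logs (left : List String) (right : List String) (mode : String) (out : List (String × String)) : Prop := out = diff_logs_alt left right mode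
instance (left : List String) (right : List String) (mode : String) (out : List (String × String)) : Decidable (Spec_diff_logs left right mode out) := by unfold Spec_diff_logs; infer_instance

-- ===== CLAIM (what is proved, stated in full; the proofs are below) =====
def Claim_equal_diff_logs : Prop := ∀ (left : List String) (right : List String) (mode : String), Dom_diff_logs left right mode → Spec_diff_logs left right mode (diff_logs left right mode)

-- ===== LEMMAS AND PROOFS =====

theorem filter_contains_cons_ne (a : String) (T L : List String) (h : ∀ x ∈ L, a < x) :
    L.filter (fun x => (a :: T).contains x) = L.filter (fun x => T.contains x) := by
  apply List.filter_congr; intro x hx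
  simp [(ne_of_gt (h x hx) : x ≠ a)]

theorem filter_not_contains_cons_ne (a : String) (T L : List String) (h : ∀ x ∈ L, a < x) :
    L.filter (fun x => !(a :: T).contains x) = L.filter (fun x => !T.contains x) := by
  apply List.filter_congr; intro x hx
  simp [(ne_of_gt (h x hx) : x ≠ a)]

-- on strictly increasing lists the merge computes the two differences and the intersection
theorem pvMerge_spec (L R : List String) (hL : L.Pairwise (· < ·)) (hR : R.Pairwise (· < ·)) :
    pvMerge L R = (L.filter (fun x => !R.contains x), R.filter (fun x => !L.contains x),
                   L.filter (fun x => R.contains x)) := by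
  fun_induction pvMerge L R with
  | case1 ls => simp
  | case2 r rs => simp
  | case3 ls r rs ol og co hmg ih =>
    rw [List.pairwise_cons] at hL hR
    obtain ⟨h1, h2, h3⟩ : ol = ls.filter (fun x => !rs.contains x) ∧
        og = rs.filter (fun x => !ls.contains x) ∧ co = ls.filter (fun x => rs.contains x) := by
      have := hmg.symm.trans (ih hL.2 hR.2); simpa [Prod.ext_iff] using this
    subst h1; subst h2; subst h3
    simp only [List.filter_cons, List.contains_cons, Prod.mk.injEq]
    simp
    refine ⟨?_, ?_, ?_⟩
    · apply List.filter_congr; intro x hx; simp [ne_of_gt (hL.1 x hx)]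
    · apply List.filter_congr; intro x hx; simp [ne_of_gt (hR.1 x hx)]
    · apply List.filter_congr; intro x hx; simp [ne_of_gt (hL.1 x hx)]
  | case4 l ls r rs hne hlt ol og co hmg ih =>
    rw [List.pairwise_cons] at hL
    have hRall : ∀ x ∈ r :: rs, l < x := by
      intro x hx
      rcases List.mem_cons.mp hx with h | h
      · exact h ▸ hlt
      · rw [List.pairwise_cons] at hR; exact lt_trans hlt (hR.1 x h)
    obtain ⟨h1, h2, h3⟩ : ol = ls.filter (fun x => !(r :: rs).contains x) ∧
        og = (r :: rs).filter (fun x => !ls.contains x) ∧ co = ls.filter (fun x => (r :: rs).contains x) := by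
      have := hmg.symm.trans (ih hL.2 hR); simpa [Prod.ext_iff] using this
    subst h1; subst h2; subst h3
    have hlnot : (r :: rs).contains l = false := by
      simp only [List.contains_eq_mem, decide_eq_false_iff_not]
      exact fun hmem => absurd (hRall l hmem) (lt_irrefl l)
    have h2' : (r :: rs).filter (fun x => !(l :: ls).contains x) =
               (r :: rs).filter (fun x => !ls.contains x) :=
      filter_not_contains_cons_ne l ls (r :: rs) hRall
    simp [List.filter_cons, hlnot, h2']
    have hlrs : l ∉ rs := fun h => absurd (hRall l (List.mem_cons_of_mem _ h)) (lt_irrefl l)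
    have hfilt : rs.filter (fun x => !decide (x = l) && !decide (x ∈ ls)) = rs.filter (fun x => !decide (x ∈ ls)) := by
      apply List.filter_congr; intro x hx
      rw [List.pairwise_cons] at hR
      simp [ne_of_gt (lt_trans hlt (hR.1 x hx))]
    refine ⟨⟨hne, hlrs⟩, ?_, hne, hlrs⟩
    rw [hfilt]
    by_cases hrls : r ∈ ls
    · simp [hrls]
    · simp [hrls, (show r ≠ l from fun h => hne h.symm)]
  | case5 l ls r rs hne hnlt ol og co hmg ih =>
    have hrl : r < l := lt_of_le_of_ne (not_lt.mp hnlt) (Ne.symm hne)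
    rw [List.pairwise_cons] at hR
    have hLall : ∀ x ∈ l :: ls, r < x := by
      intro x hx
      rcases List.mem_cons.mp hx with h | h
      · exact h ▸ hrl
      · rw [List.pairwise_cons] at hL; exact lt_trans hrl (hL.1 x h)
    obtain ⟨h1, h2, h3⟩ : ol = (l :: ls).filter (fun x => !rs.contains x) ∧
        og = rs.filter (fun x => !(l :: ls).contains x) ∧ co = (l :: ls).filter (fun x => rs.contains x) := by
      have := hmg.symm.trans (ih hL hR.2); simpa [Prod.ext_iff] using this
    subst h1; subst h2; subst h3
    have hrnot : (l :: ls).contains r = false := by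
      simp only [List.contains_eq_mem, decide_eq_false_iff_not]
      exact fun hmem => absurd (hLall r hmem) (lt_irrefl r)
    rw [filter_not_contains_cons_ne r rs (l :: ls) hLall,
        filter_contains_cons_ne r rs (l :: ls) hLall]
    simp [List.filter_cons, hrnot]
    exact ⟨fun h => hne h.symm, fun h => absurd (hLall r (List.mem_cons_of_mem _ h)) (lt_irrefl r)⟩

-- a stable sort of a filtered deduped list is the filter of the sorted list
theorem sorted_filter_comm (S : List String) (hS : (PySem.List.sorted S (fun x => x)).Pairwise (· < ·))
    (p : String → Bool) :
    List.filter p (PySem.List.sorted S (fun x => x)) = PySem.List.sorted (List.filter p S) (fun x => x) := by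
  symm
  apply PySem.List.sorted_eq_of_perm_of_pairwise_lt
  · exact (PySem.List.sorted_perm S (fun x => x) false).filter p
  · exact hS.filter p

theorem main_eq (left right : List String) (mode : String) :
    diff_logs left right mode = diff_logs_alt left right mode := by
  unfold diff_logs diff_logs_alt
  simp only []
  have hLp := PySem.List.sorted_ofList_pairwise_lt (left.map pvKey)
  have hRp := PySem.List.sorted_ofList_pairwise_lt (right.map pvKey)
  rw [pvMerge_spec _ _ hLp hRp]
  simp only []
  have hlperm := PySem.List.sorted_perm (PySem.Set.ofList (left.map pvKey)) (fun x => x) false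
  have hrperm := PySem.List.sorted_perm (PySem.Set.ofList (right.map pvKey)) (fun x => x) false
  have congr1 : ∀ (L T T' : List String), T.Perm T' →
      L.filter (fun x => !T.contains x) = L.filter (fun x => !T'.contains x) := by
    intro L T T' hp; apply List.filter_congr; intro x _
    simp [List.contains_eq_mem, hp.mem_iff]
  have congr2 : ∀ (L T T' : List String), T.Perm T' →
      L.filter (fun x => T.contains x) = L.filter (fun x => T'.contains x) := by
    intro L T T' hp; apply List.filter_congr; intro x _
    simp [List.contains_eq_mem, hp.mem_iff]
  rw [congr1 _ _ _ hrperm, congr1 _ _ _ hlperm, congr2 _ _ _ hrperm,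
      sorted_filter_comm _ hLp, sorted_filter_comm _ hRp, sorted_filter_comm _ hLp]
  rfl

-- ===== VERDICT (by name: the statement is the Claim_ definition above) =====
theorem diff_logs_spec : Claim_equal_diff_logs := by
  intro left right mode _
  exact main_eq left right mode
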